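-- pv_equiv track=rewrite | github.com/Ace1928/eidosian_forge | archive_forge/src/archive_forge/class_DesignOfExperiments.py | _sgn
-- ===== SOURCE A (Python) =====
-- def _sgn(p):
--     """
--     This is a helper function for stochastic_program function to compute the determinant formula.
--     Give the signature of a permutation
--
--     Parameters
--     -----------
--     p: the permutation (a list)
--
--     Returns
--     -------
--     1 if the number of exchange is an even number
--     -1 if the number is an odd number
--     """
--     if len(p) == 1:
--         return 1
--     trans = 0
--     for i in range(0, len(p)):
--         j = i + 1
--         for j in range(j, len(p)):
--             if p[i] > p[j]:
--                 trans = trans + 1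
--     if trans % 2 == 0:
--         return 1
--     else:
--         return -1
-- ===== SOURCE B (Python) =====
-- def _sgn(p):
--     # Merge-sort inversion counting: O(n log n) instead of A's O(n^2) pair scan.
--     def msort(a):
--         n = len(a)
--         if n <= 1:
--             return a, 0
--         left, linv = msort(a[:n // 2])
--         right, rinv = msort(a[n // 2:])
--         merged = []
--         inv = linv + rinv
--         i = j = 0
--         while i < len(left) and j < len(right):
--             if left[i] <= right[j]:
--                 merged.append(left[i])
--                 i += 1
--             else:
--                 merged.append(right[j])
--                 j += 1
--                 inv += len(left) - i
--         merged.extend(left[i:])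
--         merged.extend(right[j:])
--         return merged, inv
--     _, inv = msort(p)
--     return 1 if inv % 2 == 0 else -1
-- ===== Notes on version B (the rewrite author's own statement) =====
-- stated objective: faster
-- what changed: Replaced the quadratic double index loop counting inversions with merge-sort inversion counting, returning the parity as before.
import Mathlib
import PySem

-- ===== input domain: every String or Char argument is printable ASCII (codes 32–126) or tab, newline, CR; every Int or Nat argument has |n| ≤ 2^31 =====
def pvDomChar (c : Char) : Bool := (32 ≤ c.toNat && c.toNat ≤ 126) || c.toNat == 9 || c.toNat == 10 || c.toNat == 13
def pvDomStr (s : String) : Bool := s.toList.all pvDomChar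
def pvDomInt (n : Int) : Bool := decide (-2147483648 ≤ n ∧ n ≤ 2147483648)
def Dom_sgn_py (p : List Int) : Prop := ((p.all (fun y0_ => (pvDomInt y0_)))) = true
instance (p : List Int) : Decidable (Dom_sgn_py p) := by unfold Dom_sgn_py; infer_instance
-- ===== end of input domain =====

-- B replaces A's quadratic double index loop by merge-sort inversion counting (same parity result, O(n log n)).

-- ===== PORT A =====
-- Literal port of A: for i in range(0, len(p)): for j in range(i+1, len(p)): count p[i] > p[j]; then parity.
-- Indices produced by the ranges are always in range, so p[i]/p[j] are pyGetD with an unused default.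
def sgn_py (p : List Int) : Int :=
  if PySem.List.len p = 1 then 1
  else
    let trans : Int :=
      (PySem.List.pyRange 0 (PySem.List.len p)).foldl (fun trans i =>
        (PySem.List.pyRange (i + 1) (PySem.List.len p)).foldl (fun trans j =>
          if PySem.List.pyGetD p i 0 > PySem.List.pyGetD p j 0 then trans + 1 else trans)
          trans) 0
    if PySem.Int.mod trans 2 = 0 then 1 else -1

-- ===== PORT B =====
-- Source B's merge step (the while loop plus the two extends), counting cross inversions:
-- when the right head is taken, all remaining left elements (len(left) - i of them) form inversions with it.
def pvMerge : List Int → List Int → List Int × Nat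
  | [], r => (r, 0)
  | a :: l, [] => (a :: l, 0)
  | a :: l, b :: r =>
    if a ≤ b then
      let rest := pvMerge l (b :: r)
      (a :: rest.1, rest.2)
    else
      let rest := pvMerge (a :: l) r
      (b :: rest.1, rest.2 + (l.length + 1))

-- Source B's recursive msort: split at n//2, sort the halves, merge, add the inversion counts.
def pvMsort (a : List Int) : List Int × Nat :=
  if _h : a.length ≤ 1 then (a, 0)
  else
    let L := pvMsort (a.take (a.length / 2))
    let R := pvMsort (a.drop (a.length / 2))
    let M := pvMerge L.1 R.1
    (M.1, L.2 + R.2 + M.2)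
termination_by a.length
decreasing_by
  · simp only [List.length_take]; omega
  · simp only [List.length_drop]; omega

def sgn_py_alt (p : List Int) : Int :=
  if (pvMsort p).2 % 2 = 0 then 1 else -1

-- ===== PRECONDITION & SPEC =====
def Spec_sgn_py (p : List Int) (out : Int) : Prop := out = sgn_py_alt p
instance (p : List Int) (out : Int) : Decidable (Spec_sgn_py p out) := by unfold Spec_sgn_py; infer_instance

-- ===== CLAIM (what is proved, stated in full; the proofs are below) =====
def Claim_equal_sgn_py : Prop := ∀ (p : List Int), Dom_sgn_py p → Spec_sgn_py p (sgn_py p)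

-- ===== LEMMAS AND PROOFS =====

-- Structural inversion count: pairs (earlier, later) with earlier > later.
def invN : List Int → Nat
  | [] => 0
  | a :: l => l.countP (fun b => decide (b < a)) + invN l

-- Cross inversions between a left and a right block.
def crossN (l r : List Int) : Nat :=
  (l.map (fun a => r.countP (fun b => decide (b < a)))).sum

theorem crossN_cons_left (a : Int) (l r : List Int) :
    crossN (a :: l) r = r.countP (fun b => decide (b < a)) + crossN l r := by
  simp [crossN]

theorem crossN_cons_right (b : Int) (l r : List Int) :
    crossN l (b :: r) = l.countP (fun a => decide (b < a)) + crossN l r := by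
  induction l with
  | nil => simp [crossN]
  | cons a l ih =>
    simp only [crossN_cons_left, List.countP_cons, ih]
    by_cases h : b < a <;> simp [h] <;> omega

theorem crossN_perm_left {l l' : List Int} (r : List Int) (h : l.Perm l') :
    crossN l r = crossN l' r :=
  List.Perm.sum_eq (h.map _)

theorem crossN_perm_right (l : List Int) {r r' : List Int} (h : r.Perm r') :
    crossN l r = crossN l r' := by
  simp only [crossN, h.countP_eq]

theorem invN_append (l r : List Int) :
    invN (l ++ r) = invN l + invN r + crossN l r := by
  induction l with
  | nil => simp [invN, crossN]
  | cons a l ih =>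
    simp only [List.cons_append, invN, List.countP_append, ih, crossN_cons_left]
    omega

theorem pvMerge_perm (l r : List Int) : (pvMerge l r).1.Perm (l ++ r) := by
  fun_induction pvMerge l r with
  | case1 r => simp
  | case2 a l => simp
  | case3 a l b r hab rest ih =>
    simpa [pvMerge, hab, rest] using ih.cons a
  | case4 a l b r hab rest ih =>
    exact (ih.cons b).trans List.perm_middle.symm

theorem pvMerge_sorted {l r : List Int} (hl : l.Pairwise (· ≤ ·)) (hr : r.Pairwise (· ≤ ·)) :
    (pvMerge l r).1.Pairwise (· ≤ ·) := by
  fun_induction pvMerge l r with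
  | case1 r => simpa using hr
  | case2 a l => simpa using hl
  | case3 a l b r hab rest ih =>
    rw [List.pairwise_cons]
    refine ⟨?_, ih hl.of_cons hr⟩
    intro x hx
    have hx' : x ∈ l ++ (b :: r) := (pvMerge_perm l (b :: r)).mem_iff.mp hx
    rcases List.mem_append.mp hx' with h | h
    · exact (List.pairwise_cons.mp hl).1 x h
    · rcases List.mem_cons.mp h with rfl | h
      · exact hab
      · exact le_trans hab ((List.pairwise_cons.mp hr).1 x h)
  | case4 a l b r hab rest ih =>
    rw [List.pairwise_cons]
    refine ⟨?_, ih hl hr.of_cons⟩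
    intro x hx
    have hx' : x ∈ (a :: l) ++ r := (pvMerge_perm (a :: l) r).mem_iff.mp hx
    rcases List.mem_append.mp hx' with h | h
    · rcases List.mem_cons.mp h with rfl | h
      · exact le_of_lt (lt_of_not_ge hab)
      · exact le_trans (le_of_lt (lt_of_not_ge hab)) ((List.pairwise_cons.mp hl).1 x h)
    · exact (List.pairwise_cons.mp hr).1 x h

theorem pvMerge_count {l r : List Int} (hl : l.Pairwise (· ≤ ·)) (hr : r.Pairwise (· ≤ ·)) :
    (pvMerge l r).2 = crossN l r := by
  fun_induction pvMerge l r with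
  | case1 r => simp [crossN]
  | case2 a l => simp [crossN]
  | case3 a l b r hab rest ih =>
    show (pvMerge l (b :: r)).2 = crossN (a :: l) (b :: r)
    have hz : (b :: r).countP (fun x => decide (x < a)) = 0 := by
      rw [List.countP_eq_zero]
      intro x hx
      rcases List.mem_cons.mp hx with rfl | h
      · simpa using not_lt.mpr hab
      · simpa using not_lt.mpr (le_trans hab ((List.pairwise_cons.mp hr).1 x h))
    rw [crossN_cons_left, hz, ih hl.of_cons hr]
    omega
  | case4 a l b r hab rest ih =>
    show (pvMerge (a :: l) r).2 + (l.length + 1) = crossN (a :: l) (b :: r)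
    have hfull : (a :: l).countP (fun x => decide (b < x)) = (a :: l).length := by
      rw [List.countP_eq_length]
      intro x hx
      rcases List.mem_cons.mp hx with rfl | h
      · simpa using lt_of_not_ge hab
      · simpa using lt_of_lt_of_le (lt_of_not_ge hab) ((List.pairwise_cons.mp hl).1 x h)
    rw [crossN_cons_right, hfull, ih hl hr.of_cons]
    simp only [List.length_cons]
    omega

theorem pvMsort_spec (a : List Int) :
    (pvMsort a).1.Perm a ∧ (pvMsort a).1.Pairwise (· ≤ ·) ∧ (pvMsort a).2 = invN a := by
  fun_induction pvMsort a with
  | case1 a h =>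
    refine ⟨List.Perm.refl a, ?_, ?_⟩
    · match a, h with
      | [], _ => simp
      | [x], _ => simp
    · match a, h with
      | [], _ => rfl
      | [x], _ => rfl
  | case2 a h L R M ihL ihR =>
    obtain ⟨pL, sL, cL⟩ := ihL
    obtain ⟨pR, sR, cR⟩ := ihR
    refine ⟨?_, pvMerge_sorted sL sR, ?_⟩
    · exact (pvMerge_perm _ _).trans ((pL.append pR).trans
        (by rw [List.take_append_drop]))
    · show (pvMsort (a.take (a.length / 2))).2 + (pvMsort (a.drop (a.length / 2))).2 +
        (pvMerge (pvMsort (a.take (a.length / 2))).1 (pvMsort (a.drop (a.length / 2))).1).2 = invN a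
      have hc : (pvMerge (pvMsort (a.take (a.length / 2))).1 (pvMsort (a.drop (a.length / 2))).1).2
          = crossN (a.take (a.length / 2)) (a.drop (a.length / 2)) :=
        (pvMerge_count sL sR).trans ((crossN_perm_left _ pL).trans (crossN_perm_right _ pR))
      have hiv := invN_append (a.take (a.length / 2)) (a.drop (a.length / 2))
      rw [List.take_append_drop] at hiv
      rw [hc, cL, cR, hiv]

-- A's inner loop counts, among the entries after index i, those smaller than p[i].
theorem inner_count (p : List Int) (i t : Int) (hi : 0 ≤ i) :
    (PySem.List.pyRange (i + 1) (PySem.List.len p)).foldl (fun trans j =>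
        if PySem.List.pyGetD p i 0 > PySem.List.pyGetD p j 0 then trans + 1 else trans) t
      = t + (((p.drop (i + 1).toNat).countP (fun b => decide (b < PySem.List.pyGetD p i 0)) : Int)) := by
  rw [PySem.List.foldl_pyRange_pyGetD p 0
    (fun acc x => if PySem.List.pyGetD p i 0 > x then acc + 1 else acc) t (by omega)]
  simpa using PySem.List.foldl_count_if (fun x => decide (x < PySem.List.pyGetD p i 0))
    (p.drop (i + 1).toNat) t

theorem sum_counts (p : List Int) :
    ((List.range p.length).map (fun k =>
        (((p.drop (k + 1)).countP (fun b => decide (b < p.getD k 0))) : Int))).sum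
      = (invN p : Int) := by
  induction p with
  | nil => simp [invN]
  | cons a p ih =>
    rw [List.length_cons, List.range_succ_eq_map, List.map_cons, List.map_map, List.sum_cons]
    have hmap : ((List.range p.length).map ((fun k =>
        ((((a :: p).drop (k + 1)).countP (fun b => decide (b < (a :: p).getD k 0))) : Int)) ∘ Nat.succ))
        = (List.range p.length).map (fun k =>
        (((p.drop (k + 1)).countP (fun b => decide (b < p.getD k 0))) : Int)) := by
      apply List.map_congr_left
      intro k _
      rfl
    rw [hmap, ih]
    simp only [List.drop_succ_cons, List.drop_zero, List.getD_cons_zero, invN]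
    push_cast
    ring

theorem sgn_py_eq_invN (p : List Int) :
    sgn_py p = if invN p % 2 = 0 then 1 else -1 := by
  unfold sgn_py
  by_cases h1 : PySem.List.len p = 1
  · have hp : p.length = 1 := by simpa [PySem.List.len] using h1
    match p, hp with
    | [x], _ => simp [invN]
  · rw [if_neg h1]
    have htrans :
        (PySem.List.pyRange 0 (PySem.List.len p)).foldl (fun trans i =>
          (PySem.List.pyRange (i + 1) (PySem.List.len p)).foldl (fun trans j =>
            if PySem.List.pyGetD p i 0 > PySem.List.pyGetD p j 0 then trans + 1 else trans)
            trans) 0 = (invN p : Int) := by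
      have hbody : ∀ (t : Int), ∀ i ∈ PySem.List.pyRange 0 (PySem.List.len p),
          (PySem.List.pyRange (i + 1) (PySem.List.len p)).foldl (fun trans j =>
            if PySem.List.pyGetD p i 0 > PySem.List.pyGetD p j 0 then trans + 1 else trans) t
          = t + (((p.drop (i + 1).toNat).countP (fun b => decide (b < PySem.List.pyGetD p i 0)) : Int)) := by
        intro t i hi
        have : 0 ≤ i := by
          have := PySem.List.mem_pyRange_one.mp hi
          omega
        exact inner_count p i t this
      calc _ = (PySem.List.pyRange 0 (PySem.List.len p)).foldl (fun t i =>
            t + (((p.drop (i + 1).toNat).countP (fun b => decide (b < PySem.List.pyGetD p i 0)) : Int))) 0 := by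
            apply PySem.List.foldl_congr_mem
            intro t i hi
            exact hbody t i hi
        _ = (invN p : Int) := by
            rw [PySem.List.foldl_add]
            have hlen : PySem.List.len p = (p.length : Int) := by simp [PySem.List.len]
            rw [hlen, PySem.List.pyRange_zero_nat, List.map_map]
            have hmap : ((List.range p.length).map ((fun i =>
                (((p.drop (i + 1).toNat).countP (fun b => decide (b < PySem.List.pyGetD p i 0))) : Int)) ∘ (fun k : Nat => (k : Int))))
                = (List.range p.length).map (fun k =>
                (((p.drop (k + 1)).countP (fun b => decide (b < p.getD k 0))) : Int)) := by
              apply List.map_congr_left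
              intro k _
              have h1 : ((k : Int) + 1).toNat = k + 1 := by omega
              simp [h1, PySem.List.pyGetD_natCast]
            rw [hmap, sum_counts]
            ring
    rw [htrans]
    have hm : PySem.Int.mod ((invN p : Int)) 2 = ((invN p % 2 : Nat) : Int) := by
      exact_mod_cast PySem.Int.mod_natCast (invN p) 2
    rcases Nat.mod_two_eq_zero_or_one (invN p) with h | h <;> simp [hm, h] <;> omega

theorem sgn_py_alt_eq_invN (p : List Int) :
    sgn_py_alt p = if invN p % 2 = 0 then 1 else -1 := by
  unfold sgn_py_alt
  rw [(pvMsort_spec p).2.2]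

-- ===== VERDICT (by name: the statement is the Claim_ definition above) =====
theorem sgn_py_spec : Claim_equal_sgn_py := by
  intro p _
  unfold Spec_sgn_py
  rw [sgn_py_eq_invN, sgn_py_alt_eq_invN]
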